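-- pv_equiv track=rewrite | github.com/guerard18/equipes-hockey | utils.py | snake_partition
-- ===== SOURCE A (Python) =====
-- from typing import List, Tuple, Dict
--
-- def snake_partition(sorted_players: List[Tuple[str,int]], group_size: int) -> List[List[Tuple[str,int]]]:
--     """Répartit en groupes de taille fixe en 'snake draft' pour équilibrer les totaux."""
--     groups = [[]]
--     direction = 1
--     idx = 0
--     for p in sorted_players:
--         groups[idx].append(p)
--         if len(groups[idx]) == group_size:
--             if len(groups) == 4:  # on veut 4 trios/duos
--                 continue
--             if direction == 1:
--                 groups.append([])
--                 idx += 1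
--             else:
--                 groups.append([])
--                 idx += 1
--         # alterner sens à chaque passage complet
--         if idx == 3 and len(groups[idx]) == group_size:
--             direction *= -1
--     # si pas exactement 4 groupes, compléter
--     while len(groups) < 4:
--         groups.append([])
--     return groups[:4]
-- ===== SOURCE B (Python) =====
-- from typing import List, Tuple
--
-- def snake_partition(sorted_players: List[Tuple[str, int]], group_size: int) -> List[List[Tuple[str, int]]]:
--     """Closed-form version: groups 0-2 are consecutive slices of group_size
--     players, group 3 takes everything remaining; a non-positive group_size
--     means no group ever fills, so all players stay in group 0."""
--     if group_size < 1:
--         return [list(sorted_players), [], [], []]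
--     g = group_size
--     return [sorted_players[0:g],
--             sorted_players[g:2 * g],
--             sorted_players[2 * g:3 * g],
--             sorted_players[3 * g:]]
-- ===== Notes on version B (the rewrite author's own statement) =====
-- stated objective: simpler
-- what changed: Replaced the incremental append loop with pointer/direction bookkeeping (whose snake 'direction' is dead code) by closed-form slicing: groups 0-2 are consecutive group_size slices and group 3 gets the open-ended rest; group_size<1 returns all players in group 0.
import Mathlib
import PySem

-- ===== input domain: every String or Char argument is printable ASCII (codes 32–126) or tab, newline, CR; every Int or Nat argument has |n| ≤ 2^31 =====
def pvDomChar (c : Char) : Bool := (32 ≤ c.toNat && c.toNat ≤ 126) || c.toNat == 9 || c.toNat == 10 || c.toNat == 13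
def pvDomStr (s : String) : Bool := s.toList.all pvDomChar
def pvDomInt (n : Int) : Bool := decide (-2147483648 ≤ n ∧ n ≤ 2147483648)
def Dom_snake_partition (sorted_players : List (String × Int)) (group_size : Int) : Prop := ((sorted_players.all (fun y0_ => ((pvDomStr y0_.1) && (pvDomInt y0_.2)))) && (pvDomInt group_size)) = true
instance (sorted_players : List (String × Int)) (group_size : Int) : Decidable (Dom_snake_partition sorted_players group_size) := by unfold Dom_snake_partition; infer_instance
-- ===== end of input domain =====

-- B replaces A's append loop (whose snake 'direction' logic is dead code) by closed-form slicing; objective: simpler.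

-- ===== PORT A =====
-- one loop iteration of A's `for p in sorted_players` (state: groups, direction, idx);
-- A's two `direction` arms are textually identical, so the append/idx update is written once
def snake_step (group_size : Int) (st : List (List (String × Int)) × Int × Nat)
    (p : String × Int) : List (List (String × Int)) × Int × Nat :=
  let groups := st.1.set st.2.2 (st.1.getD st.2.2 [] ++ [p])   -- groups[idx].append(p)
  let direction := st.2.1
  let idx := st.2.2
  if ((groups.getD idx []).length : Int) = group_size then
    if groups.length = 4 then (groups, direction, idx)          -- continue
    else
      let groups2 := groups ++ [[]]
      let idx2 := idx + 1
      if idx2 = 3 ∧ ((groups2.getD idx2 []).length : Int) = group_size then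
        (groups2, direction * -1, idx2)
      else (groups2, direction, idx2)
  else
    if idx = 3 ∧ ((groups.getD idx []).length : Int) = group_size then
      (groups, direction * -1, idx)
    else (groups, direction, idx)

-- `while len(groups) < 4: groups.append([])`
def snake_pad4 (gs : List (List (String × Int))) : List (List (String × Int)) :=
  if gs.length < 4 then snake_pad4 (gs ++ [[]]) else gs
termination_by 4 - gs.length
decreasing_by simp; omega

def snake_partition (sorted_players : List (String × Int)) (group_size : Int) : List (List (String × Int)) :=
  (snake_pad4 (sorted_players.foldl (snake_step group_size) ([[]], 1, 0)).1).take 4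

-- ===== PORT B =====
def snake_partition_alt (sorted_players : List (String × Int)) (group_size : Int) : List (List (String × Int)) :=
  if group_size < 1 then [sorted_players, [], [], []]
  else [PySem.List.slice sorted_players (some 0) (some group_size),
        PySem.List.slice sorted_players (some group_size) (some (2 * group_size)),
        PySem.List.slice sorted_players (some (2 * group_size)) (some (3 * group_size)),
        PySem.List.slice sorted_players (some (3 * group_size)) none]

-- ===== PRECONDITION & SPEC =====
def Spec_snake_partition (sorted_players : List (String × Int)) (group_size : Int) (out : List (List (String × Int))) : Prop := out = snake_partition_alt sorted_players group_size
instance (sorted_players : List (String × Int)) (group_size : Int) (out : List (List (String × Int))) : Decidable (Spec_snake_partition sorted_players group_size out) := by unfold Spec_snake_partition; infer_instance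

-- ===== CLAIM (what is proved, stated in full; the proofs are below) =====
def Claim_equal_snake_partition : Prop := ∀ (sorted_players : List (String × Int)) (group_size : Int), Dom_snake_partition sorted_players group_size → Spec_snake_partition sorted_players group_size (snake_partition sorted_players group_size)

-- ===== LEMMAS AND PROOFS =====

-- groups from index j on, in closed form
def snake_fill (g : Nat) (j : Nat) (xs : List (String × Int)) : List (List (String × Int)) :=
  if j < 3 then xs.take g :: snake_fill g (j + 1) (xs.drop g) else [xs]
termination_by 3 - j
decreasing_by omega

lemma snake_getD_mid {α : Type} (pre : List α) (x d : α) :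
    (pre ++ [x]).getD pre.length d = x := by
  simp [List.getD]

lemma snake_set_mid {α : Type} (pre : List α) (x y : α) :
    (pre ++ [x]).set pre.length y = pre ++ [y] := by
  induction pre with
  | nil => simp
  | cons a t ih => simp [ih]

lemma snake_pad4_eq (gs : List (List (String × Int))) :
    snake_pad4 gs = gs ++ List.replicate (4 - gs.length) [] := by
  generalize h : 4 - gs.length = n
  induction n generalizing gs with
  | zero => rw [snake_pad4]; simp_all; omega
  | succ n ih =>
      rw [snake_pad4]
      have hlt : gs.length < 4 := by omega
      simp only [hlt, if_pos]
      rw [ih (gs ++ [[]]) (by simp; omega)]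
      simp [List.replicate_succ]

lemma snake_fill_nil (g : Nat) : ∀ (k j : Nat), 3 - j = k → j ≤ 3 →
    snake_fill g j [] = [] :: List.replicate (3 - j) [] := by
  intro k
  induction k with
  | zero =>
      intro j hk hj
      have h3 : j = 3 := by omega
      subst h3
      rw [snake_fill]; simp
  | succ n ih =>
      intro j hk hj
      have hlt : j < 3 := by omega
      rw [snake_fill, if_pos hlt]
      simp only [List.take_nil, List.drop_nil]
      rw [ih (j + 1) (by omega) (by omega)]
      have : 3 - j = (3 - (j + 1)) + 1 := by omega
      rw [this, List.replicate_succ]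

lemma snake_fill_small (g j : Nat) (cur : List (String × Int)) (hj : j ≤ 3)
    (hcur : j < 3 → cur.length < g) :
    snake_fill g j cur = cur :: List.replicate (3 - j) [] := by
  by_cases h3 : j = 3
  · subst h3; rw [snake_fill]; simp
  · have hlt : j < 3 := by omega
    have hle : cur.length ≤ g := le_of_lt (hcur hlt)
    rw [snake_fill, if_pos hlt, List.take_of_length_le hle, List.drop_eq_nil_of_le hle]
    rw [snake_fill_nil g (3 - (j + 1)) (j + 1) rfl (by omega)]
    have : 3 - j = (3 - (j + 1)) + 1 := by omega
    rw [this, List.replicate_succ]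

lemma snake_main (g : Nat) (hg : 1 ≤ g) (l : List (String × Int)) :
    ∀ (pre : List (List (String × Int))) (cur : List (String × Int)) (dir : Int),
      pre.length ≤ 3 → (pre.length < 3 → cur.length < g) →
      (snake_pad4 (l.foldl (snake_step (g : Int)) (pre ++ [cur], dir, pre.length)).1).take 4
        = pre ++ snake_fill g pre.length (cur ++ l) := by
  induction l with
  | nil =>
      intro pre cur dir hj hcur
      simp only [List.foldl_nil, List.append_nil]
      rw [snake_pad4_eq, snake_fill_small g pre.length cur hj hcur]
      have hlen : (pre ++ [cur]).length = pre.length + 1 := by simp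
      rw [List.take_of_length_le (by simp [hlen]; omega)]
      simp
  | cons p rest ih =>
      intro pre cur dir hj hcur
      simp only [List.foldl_cons]
      by_cases hfull : (cur ++ [p]).length = g
      · have c1 : (((cur ++ [p]).length : Int)) = (g : Int) := by exact_mod_cast hfull
        by_cases h3 : pre.length = 3
        · -- group full but already 4 groups: `continue`
          have hstep : snake_step (g : Int) (pre ++ [cur], dir, pre.length) p
              = (pre ++ [cur ++ [p]], dir, pre.length) := by
            simp only [snake_step, snake_getD_mid, snake_set_mid]
            rw [if_pos c1]
            have h4 : (pre ++ [cur ++ [p]]).length = 4 := by simp [h3]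
            rw [if_pos h4]
          rw [hstep]
          have h := ih pre (cur ++ [p]) dir hj (fun hh => absurd hh (by omega))
          rw [h]
          simp
        · -- group full: open a fresh group, idx moves on
          have hjlt : pre.length < 3 := by omega
          have hstep : snake_step (g : Int) (pre ++ [cur], dir, pre.length) p
              = (pre ++ [cur ++ [p]] ++ [[]], dir, pre.length + 1) := by
            simp only [snake_step, snake_getD_mid, snake_set_mid]
            rw [if_pos c1]
            have h4 : ¬ (pre ++ [cur ++ [p]]).length = 4 := by simp; omega
            rw [if_neg h4]
            have hmid : (pre ++ [cur ++ [p]] ++ [[]]).getD (pre.length + 1) []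
                = ([] : List (String × Int)) := by
              have h := snake_getD_mid (pre ++ [cur ++ [p]]) ([] : List (String × Int)) []
              simpa using h
            rw [hmid]
            have c3 : ¬ (pre.length + 1 = 3 ∧
                ((([] : List (String × Int)).length : Int) = (g : Int))) := by
              rintro ⟨_, hb⟩
              simp at hb
              omega
            rw [if_neg c3]
          rw [hstep]
          have hl : (pre ++ [cur ++ [p]]).length = pre.length + 1 := by simp
          have h := ih (pre ++ [cur ++ [p]]) [] dir (by simp; omega) (fun _ => by simp only [List.length_nil]; omega)
          rw [hl] at h
          rw [h]
          have hfillstep : snake_fill g pre.length (cur ++ p :: rest)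
              = (cur ++ [p]) :: snake_fill g (pre.length + 1) rest := by
            rw [snake_fill, if_pos hjlt]
            have hx : cur ++ p :: rest = (cur ++ [p]) ++ rest := by simp
            rw [hx, List.take_left' hfull, List.drop_left' hfull]
          rw [hfillstep]
          simp
      · -- group not yet full: stay at the same index
        have c1 : ¬ (((cur ++ [p]).length : Int)) = (g : Int) := by
          intro h
          exact hfull (by exact_mod_cast h)
        have hstep : snake_step (g : Int) (pre ++ [cur], dir, pre.length) p
            = (pre ++ [cur ++ [p]], dir, pre.length) := by
          simp only [snake_step, snake_getD_mid, snake_set_mid]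
          rw [if_neg c1]
          have c4 : ¬ (pre.length = 3 ∧ (((cur ++ [p]).length : Int)) = (g : Int)) := by
            tauto
          rw [if_neg c4]
        rw [hstep]
        have hlt : pre.length < 3 → (cur ++ [p]).length < g := by
          intro hh
          have h1 := hcur hh
          simp only [List.length_append, List.length_cons, List.length_nil] at hfull ⊢
          omega
        have h := ih pre (cur ++ [p]) dir hj hlt
        rw [h]
        simp

-- non-positive group_size: the fullness test never fires, everything stays in group 0
lemma snake_neg (gs : Int) (hgs : gs ≤ 0) (l : List (String × Int)) :
    ∀ (cur : List (String × Int)) (dir : Int),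
      l.foldl (snake_step gs) ([cur], dir, 0) = ([cur ++ l], dir, 0) := by
  induction l with
  | nil => intro cur dir; simp
  | cons p rest ih =>
      intro cur dir
      simp only [List.foldl_cons]
      have hstep : snake_step gs ([cur], dir, 0) p = ([cur ++ [p]], dir, 0) := by
        simp only [snake_step]
        have hget : ([cur] : List (List (String × Int))).getD 0 [] = cur := by simp [List.getD]
        have hset : ([cur] : List (List (String × Int))).set 0 (cur ++ [p]) = [cur ++ [p]] := by
          simp
        rw [hget, hset]
        have hget2 : ([cur ++ [p]] : List (List (String × Int))).getD 0 [] = cur ++ [p] := by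
          simp [List.getD]
        rw [hget2]
        have c1 : ¬ (((cur ++ [p]).length : Int)) = gs := by
          simp only [List.length_append, List.length_cons, List.length_nil]
          omega
        rw [if_neg c1]
        have c2 : ¬ ((0 : Nat) = 3 ∧ (((cur ++ [p]).length : Int)) = gs) := by tauto
        rw [if_neg c2]
      rw [hstep, ih]
      simp

lemma snake_fill_zero (g : Nat) (l : List (String × Int)) :
    snake_fill g 0 l
      = [l.take g, (l.drop g).take g, (l.drop (2 * g)).take g, l.drop (3 * g)] := by
  rw [snake_fill, if_pos (by omega)]
  rw [snake_fill, if_pos (by omega)]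
  rw [snake_fill, if_pos (by omega)]
  rw [snake_fill, if_neg (by omega)]
  rw [List.drop_drop, List.drop_drop]
  have e2 : g + g = 2 * g := by ring
  have e3 : g + g + g = 3 * g := by ring
  rw [show l.drop (g + g) = l.drop (2 * g) from by rw [e2],
      show l.drop (g + g + g) = l.drop (3 * g) from by rw [e3]]

-- ===== VERDICT (by name: the statement is the Claim_ definition above) =====
theorem snake_partition_spec : Claim_equal_snake_partition := by
  intro l gs _dom
  unfold Spec_snake_partition snake_partition snake_partition_alt
  by_cases hneg : gs < 1
  · rw [if_pos hneg, snake_neg gs (by omega) l [] 1]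
    rw [snake_pad4_eq]
    simp
  · rw [if_neg hneg]
    obtain ⟨g, rfl⟩ : ∃ g : Nat, gs = (g : Int) := ⟨gs.toNat, by omega⟩
    have hg1 : 1 ≤ g := by omega
    have hmain := snake_main g hg1 l [] [] 1 (by simp) (fun _ => by simp only [List.length_nil]; omega)
    simp only [List.length_nil, List.nil_append] at hmain
    rw [hmain, snake_fill_zero]
    have h2 : (2 : Int) * (g : Int) = ((2 * g : Nat) : Int) := by push_cast; ring
    have h3 : (3 : Int) * (g : Int) = ((3 * g : Nat) : Int) := by push_cast; ring
    have h0 : (0 : Int) = ((0 : Nat) : Int) := by norm_num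
    rw [h0, h2, h3,
        PySem.List.slice_natCast, PySem.List.slice_natCast, PySem.List.slice_natCast,
        PySem.List.slice_from_natCast]
    simp only [List.drop_zero, Nat.sub_zero, (by omega : 2 * g - g = g),
      (by omega : 3 * g - 2 * g = g)]
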